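-- pv_equiv track=rewrite | github.com/offbynull/offbynull.github.io | docs/data/learn/Bioinformatics/output/ch9_code/src/Stepik.9.11.ExerciseBreak.ComputeCountsArrayForBurrowsWheelerTransform.py | raw_cmp
-- ===== SOURCE A (Python) =====
-- def raw_cmp(a: str, b: str):
--     for a_ch, b_ch in zip(a, b):
--         if a_ch == '$' and b_ch == '$':
--             continue
--         if a_ch == '$':
--             return -1
--         if b_ch == '$':
--             return 1
--         if a_ch < b_ch:
--             return -1
--         if a_ch > b_ch:
--             return 1
--     if len(a) < len(b):
--         return -1
--     elif len(b) < len(a):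
--         return 1
--     return 0
-- ===== SOURCE B (Python) =====
-- def raw_cmp(a: str, b: str):
--     ka = [(0,) if c == '$' else (1, c) for c in a]
--     kb = [(0,) if c == '$' else (1, c) for c in b]
--     return -1 if ka < kb else (1 if ka > kb else 0)
-- ===== Notes on version B (the rewrite author's own statement) =====
-- stated objective: idiomatic
-- what changed: Replaces the explicit branching character loop with a precomputed sort-key encoding ('$' as a minimal token) compared by Python's native list comparison, which handles first-difference and length tiebreak.
import Mathlib
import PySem

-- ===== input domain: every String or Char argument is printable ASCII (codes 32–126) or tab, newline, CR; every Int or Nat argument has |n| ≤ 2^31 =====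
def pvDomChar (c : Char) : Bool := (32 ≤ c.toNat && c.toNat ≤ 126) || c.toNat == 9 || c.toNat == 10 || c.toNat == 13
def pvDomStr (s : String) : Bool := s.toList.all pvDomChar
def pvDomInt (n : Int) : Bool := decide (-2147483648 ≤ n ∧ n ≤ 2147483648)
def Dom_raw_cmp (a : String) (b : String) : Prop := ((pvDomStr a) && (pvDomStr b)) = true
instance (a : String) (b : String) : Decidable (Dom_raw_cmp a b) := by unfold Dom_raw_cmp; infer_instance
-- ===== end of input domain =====

-- B replaces A's explicit branching loop with a sort-key encoding ('$' minimal) compared lexicographically (idiomatic decomposition; same cost).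


-- ===== PORT A =====
-- the for-loop over zip(a,b): returns some r at an early return, none on fall-through
def rawLoop : List (Char × Char) → Option Int
  | [] => none
  | (ac, bc) :: rest =>
    if ac = '$' ∧ bc = '$' then rawLoop rest
    else if ac = '$' then some (-1)
    else if bc = '$' then some 1
    else if ac < bc then some (-1)
    else if bc < ac then some 1
    else rawLoop rest

def raw_cmp (a : String) (b : String) : Int :=
  match rawLoop (a.toList.zip b.toList) with
  | some r => r
  | none =>
    if a.toList.length < b.toList.length then -1
    else if b.toList.length < a.toList.length then 1
    else 0

-- ===== PORT B =====
-- key encoding: '$' ↦ (0,'$') (the minimal token (0,)), c ↦ (1, c)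
def keyOf (c : Char) : Nat × Char := (if c = '$' then 0 else 1, c)

-- Python's `<` on the key lists (lexicographic, shorter-prefix-is-smaller)
def keyLt (x y : Nat × Char) : Bool := x.1 < y.1 || (x.1 == y.1 && x.2 < y.2)

def listLt : List (Nat × Char) → List (Nat × Char) → Bool
  | [], [] => false
  | [], _ :: _ => true
  | _ :: _, [] => false
  | x :: xs, y :: ys =>
    if keyLt x y then true else if keyLt y x then false else listLt xs ys

def raw_cmp_alt (a : String) (b : String) : Int :=
  let ka := a.toList.map keyOf
  let kb := b.toList.map keyOf
  if listLt ka kb then -1 else if listLt kb ka then 1 else 0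

-- ===== PRECONDITION & SPEC =====
def Spec_raw_cmp (a : String) (b : String) (out : Int) : Prop := out = raw_cmp_alt a b
instance (a : String) (b : String) (out : Int) : Decidable (Spec_raw_cmp a b out) := by unfold Spec_raw_cmp; infer_instance

-- ===== CLAIM (what is proved, stated in full; the proofs are below) =====
def Claim_equal_raw_cmp : Prop := ∀ (a : String) (b : String), Dom_raw_cmp a b → Spec_raw_cmp a b (raw_cmp a b)

-- ===== LEMMAS AND PROOFS =====

theorem main_lemma : ∀ (la lb : List Char),
    (match rawLoop (la.zip lb) with
     | some r => r
     | none => if la.length < lb.length then (-1 : Int)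
               else if lb.length < la.length then 1 else 0)
    = (if listLt (la.map keyOf) (lb.map keyOf) then -1
       else if listLt (lb.map keyOf) (la.map keyOf) then 1 else 0) := by
  intro la
  induction la with
  | nil =>
    intro lb
    cases lb <;> simp [rawLoop, listLt]
  | cons x xs ih =>
    intro lb
    cases lb with
    | nil => simp [rawLoop, listLt]
    | cons y ys =>
      by_cases hx : x = '$' <;> by_cases hy : y = '$'
      · subst hx hy
        simpa [rawLoop, listLt, keyOf, keyLt, List.zip] using ih ys
      · subst hx
        simp [rawLoop, listLt, keyOf, keyLt, hy, List.zip]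
      · subst hy
        simp [rawLoop, listLt, keyOf, keyLt, hx, List.zip]
      · by_cases hlt : x < y
        · simp [rawLoop, listLt, keyOf, keyLt, hx, hy, hlt, List.zip]

        · by_cases hgt : y < x
          · simp [rawLoop, listLt, keyOf, keyLt, hx, hy, hlt, hgt, List.zip]
          · simpa [rawLoop, listLt, keyOf, keyLt, hx, hy, hlt, hgt, List.zip] using ih ys

-- ===== VERDICT (by name: the statement is the Claim_ definition above) =====
theorem raw_cmp_spec : Claim_equal_raw_cmp := by
  intro a b _
  unfold Spec_raw_cmp raw_cmp raw_cmp_alt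
  exact main_lemma a.toList b.toList
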